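-- pv_equiv track=rewrite | github.com/Omni-HuB/ASSIGNMENT-2 | a2.py | count_by_gender
-- ===== SOURCE A (Python) =====
-- def count_by_gender(records):
--     '''
--     Description: Counts the number of males and females
--
--     Parameters:
--     - records (LIST): A list of person records (each of which is a dictionary)
--
--     Returns:
--     - A dictionary with the following two key-value pairs:
--             KEY        VALUE
--             "male"     No of males (INTEGER)
--             "female"   No of females (INTEGER)
--     '''
--     countm = 0
--     countf = 0
--     dic = {}
--     for data in records:
--         if data['gender'] == 'male':
--             countm += 1
--
--         elif data['gender'] == 'female':
--             countf += 1
--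
--     dic.update({"male": countm})
--     dic.update({'female': countf})
--
--     return(dic)
-- ===== SOURCE B (Python) =====
-- def count_by_gender(records):
--     genders = [rec['gender'] for rec in records]
--     return {'male': genders.count('male'), 'female': genders.count('female')}
-- ===== Notes on version B (the rewrite author's own statement) =====
-- stated objective: simpler
-- what changed: B replaces A's single pass with two scalar if/elif accumulators by staged passes: it first projects the list of gender values, then answers each key with list.count, with no accumulator or branching loop.
import Mathlib
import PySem

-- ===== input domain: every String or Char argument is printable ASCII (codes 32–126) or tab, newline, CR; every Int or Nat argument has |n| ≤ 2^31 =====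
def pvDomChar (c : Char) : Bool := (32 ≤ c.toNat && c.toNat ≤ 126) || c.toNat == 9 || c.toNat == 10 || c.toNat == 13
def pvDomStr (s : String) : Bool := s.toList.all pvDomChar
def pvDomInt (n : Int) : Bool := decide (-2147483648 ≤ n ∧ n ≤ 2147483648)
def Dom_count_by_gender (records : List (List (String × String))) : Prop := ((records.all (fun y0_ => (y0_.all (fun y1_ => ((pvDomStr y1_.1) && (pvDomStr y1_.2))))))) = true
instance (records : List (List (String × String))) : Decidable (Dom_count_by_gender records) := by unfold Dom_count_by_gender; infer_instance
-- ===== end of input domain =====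

-- B replaces A's one branching loop with two scalar accumulators by staged passes:
-- project the gender values, then count each of the two keys with list.count (simpler, same cost).

-- data['gender'] : first-match lookup; exact under Pre_ (key present), where get? is some
def pvGender (data : List (String × String)) : String :=
  ((PySem.Dict.mk data).get? "gender").getD ""

-- ===== PORT A =====
def count_by_gender (records : List (List (String × String))) : List (String × Int) :=
  let p := records.foldl (fun (p : Int × Int) data =>
      if pvGender data == "male" then (p.1 + 1, p.2)
      else if pvGender data == "female" then (p.1, p.2 + 1)
      else p) (0, 0)
  (((PySem.Dict.empty : PySem.Dict String Int).insert "male" p.1).insert "female" p.2).items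

-- ===== PORT B =====
def count_by_gender_alt (records : List (List (String × String))) : List (String × Int) :=
  let genders := records.map pvGender
  [("male", (PySem.List.count genders "male" : Int)),
   ("female", (PySem.List.count genders "female" : Int))]

-- ===== PRECONDITION & SPEC =====
-- Pre_ excludes exactly the records with no 'gender' key, on which Python A raises KeyError (B raises too).
def Pre_count_by_gender (records : List (List (String × String))) : Prop :=
  (records.all (fun r => r.any (fun p => p.1 == "gender"))) = true
instance (records : List (List (String × String))) : Decidable (Pre_count_by_gender records) := by unfold Pre_count_by_gender; infer_instance
def pvWitness_count_by_gender : (List (List (String × String))) := [[("gender", "male")], [("gender", "other")]]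

def Spec_count_by_gender (records : List (List (String × String))) (out : List (String × Int)) : Prop := out = count_by_gender_alt records
instance (records : List (List (String × String))) (out : List (String × Int)) : Decidable (Spec_count_by_gender records out) := by unfold Spec_count_by_gender; infer_instance

-- ===== CLAIM (what is proved, stated in full; the proofs are below) =====
def Claim_equal_count_by_gender : Prop := ∀ (records : List (List (String × String))), Dom_count_by_gender records → Pre_count_by_gender records → Spec_count_by_gender records (count_by_gender records)

-- ===== LEMMAS AND PROOFS =====

-- A's accumulator pair after the loop = offsets plus occurrence counts of the gender list
theorem pvA_loop (records : List (List (String × String))) :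
    ∀ cm cf : Int,
    records.foldl (fun (p : Int × Int) data =>
      if pvGender data == "male" then (p.1 + 1, p.2)
      else if pvGender data == "female" then (p.1, p.2 + 1)
      else p) (cm, cf)
    = (cm + ((records.map pvGender).count "male" : Nat),
       cf + ((records.map pvGender).count "female" : Nat)) := by
  induction records with
  | nil => intro cm cf; simp
  | cons h t ih =>
    intro cm cf
    rw [List.foldl_cons, List.map_cons]
    by_cases hm : pvGender h = "male"
    · rw [if_pos (by simp [hm])]
      simp only [ih, List.count_cons, hm, Prod.mk.injEq]
      constructor <;> · push_cast; simp; try ring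
    · by_cases hf : pvGender h = "female"
      · rw [if_neg (by simp [hm]), if_pos (by simp [hf])]
        simp only [ih, List.count_cons, hf, Prod.mk.injEq]
        constructor <;> · push_cast; simp; try ring
      · rw [if_neg (by simp [hm]), if_neg (by simp [hf])]
        simp only [ih, List.count_cons, Prod.mk.injEq]
        constructor <;> · push_cast; simp [hm, hf]

-- ===== VERDICT (by name: the statement is the Claim_ definition above) =====
theorem count_by_gender_spec : Claim_equal_count_by_gender := by
  intro records _ _
  unfold Spec_count_by_gender count_by_gender count_by_gender_alt
  rw [pvA_loop]
  simp [PySem.List.count_eq, PySem.Dict.items_insert, PySem.Dict.contains_insert, PySem.Dict.empty]
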